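-- pv_equiv track=rewrite | github.com/jcolinpatrick/kryptos | scripts/e_hybrid_04_reverse_k3.py | keyword_to_col_order
-- ===== SOURCE A (Python) =====
-- def keyword_to_col_order(kw, width=None):
--     kw = kw.upper()
--     w = width or len(kw)
--     kw = kw[:w]
--     if len(kw) < w:
--         return None
--     indexed = [(ch, i) for i, ch in enumerate(kw)]
--     ranked = sorted(indexed, key=lambda x: (x[0], x[1]))
--     order = [0] * w
--     for rank, (_, pos) in enumerate(ranked):
--         order[pos] = rank
--     return order
-- ===== SOURCE B (Python) =====
-- def keyword_to_col_order(kw, width=None):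
--     kw = kw.upper()
--     w = width or len(kw)
--     kw = kw[:w]
--     if len(kw) < w:
--         return None
--     # rank by counting: order[i] = number of (char, index) pairs strictly below (kw[i], i)
--     return [sum((kw[j], j) < (kw[i], i) for j in range(len(kw))) for i in range(len(kw))]
-- ===== Notes on version B (the rewrite author's own statement) =====
-- stated objective: alternative
-- what changed: Replaces the stable sort plus rank-scatter loop by a direct counting rank: order[i] is the number of (char, index) pairs strictly smaller than (kw[i], i).
import Mathlib
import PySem

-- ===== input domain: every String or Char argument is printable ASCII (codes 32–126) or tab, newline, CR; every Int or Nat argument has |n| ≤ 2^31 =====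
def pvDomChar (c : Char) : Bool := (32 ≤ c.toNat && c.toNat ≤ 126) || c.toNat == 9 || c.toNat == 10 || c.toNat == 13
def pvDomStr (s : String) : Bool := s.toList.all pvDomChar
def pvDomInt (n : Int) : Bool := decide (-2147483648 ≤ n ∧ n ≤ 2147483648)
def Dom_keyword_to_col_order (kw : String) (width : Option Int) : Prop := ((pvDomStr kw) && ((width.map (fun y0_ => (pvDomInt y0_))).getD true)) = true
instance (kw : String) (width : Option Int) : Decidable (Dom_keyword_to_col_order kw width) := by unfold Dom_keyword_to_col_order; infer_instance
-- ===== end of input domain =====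

-- B replaces A's stable sort + rank-scatter loop by a direct counting rank (same value; no speed claim).
-- Python str values are handled on the List Char side, the PySem convention.

-- ===== PORT A =====
def keyword_to_col_order (kw : String) (width : Option Int) : Option (List Int) :=
  let kwU : List Char := PySem.Chars.upper kw.toList        -- kw = kw.upper()
  let w : Int := match width with                           -- w = width or len(kw)
    | none => (kwU.length : Int)
    | some v => if v = 0 then (kwU.length : Int) else v
  let kw2 : List Char := PySem.List.slice kwU none (some w) -- kw = kw[:w]
  if (kw2.length : Int) < w then none                       -- if len(kw) < w: return None
  else
    -- indexed = [(ch, i) for i, ch in enumerate(kw)]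
    let indexed : List (Char × Int) := (PySem.List.enumerate kw2).map (fun p => (p.2, p.1))
    -- ranked = sorted(indexed, key=lambda x: (x[0], x[1]))
    let ranked := PySem.List.sorted2 indexed (fun x => x.1) (fun x => x.2)
    -- order = [0] * w : a negative repeat count gives the empty list, exactly as in Python
    let order0 : List Int := List.replicate w.toNat 0
    -- for rank, (_, pos) in enumerate(ranked): order[pos] = rank  (item assignment = pySet?, none on IndexError)
    (PySem.List.enumerate ranked).foldl
      (fun acc p => acc.bind (fun o => PySem.List.pySet? o p.2.2 p.1)) (some order0)

-- ===== PORT B =====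
-- Python tuple comparison (c1, j) < (c2, i): lexicographic, exact (Char '<' is code-point order, as in Python)
def pairLtB (a b : Char × Int) : Bool := a.1 < b.1 || (a.1 == b.1 && a.2 < b.2)

def keyword_to_col_order_alt (kw : String) (width : Option Int) : Option (List Int) :=
  let kwU : List Char := PySem.Chars.upper kw.toList        -- kw = kw.upper()
  let w : Int := match width with                           -- w = width or len(kw)
    | none => (kwU.length : Int)
    | some v => if v = 0 then (kwU.length : Int) else v
  let kw2 : List Char := PySem.List.slice kwU none (some w) -- kw = kw[:w]
  if (kw2.length : Int) < w then none                       -- if len(kw) < w: return None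
  else
    -- [sum((kw[j], j) < (kw[i], i) for j in range(len(kw))) for i in range(len(kw))]
    some ((PySem.List.pyRange 0 (kw2.length : Int)).map (fun i =>
      ((PySem.List.pyRange 0 (kw2.length : Int)).map (fun j =>
        if pairLtB (PySem.List.pyGetD kw2 j ' ', j) (PySem.List.pyGetD kw2 i ' ', i) then (1 : Int) else 0)).sum))

-- ===== PRECONDITION & SPEC =====
-- Pre_ excludes exactly the inputs where A raises IndexError: a negative width whose truncated keyword is
-- still non-empty (there order = [0]*w is empty while the scatter loop still assigns into it).
def Pre_keyword_to_col_order (kw : String) (width : Option Int) : Prop :=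
  0 ≤ width.getD 0 ∨ (kw.toList.length : Int) + width.getD 0 ≤ 0
instance (kw : String) (width : Option Int) : Decidable (Pre_keyword_to_col_order kw width) := by unfold Pre_keyword_to_col_order; infer_instance

def pvWitness_keyword_to_col_order : String × Option Int := ("KRYPTOS", none)

def Spec_keyword_to_col_order (kw : String) (width : Option Int) (out : Option (List Int)) : Prop := out = keyword_to_col_order_alt kw width
instance (kw : String) (width : Option Int) (out : Option (List Int)) : Decidable (Spec_keyword_to_col_order kw width out) := by unfold Spec_keyword_to_col_order; infer_instance

-- ===== CLAIM (what is proved, stated in full; the proofs are below) =====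
def Claim_equal_keyword_to_col_order : Prop := ∀ (kw : String) (width : Option Int), Dom_keyword_to_col_order kw width → Pre_keyword_to_col_order kw width → Spec_keyword_to_col_order kw width (keyword_to_col_order kw width)

-- ===== LEMMAS AND PROOFS =====

-- sorted2's comparison boolean is the strict lexicographic order on the key pair
lemma lex_bool (a b : Char × Int) :
    (decide (a.1 < b.1) || !decide (b.1 < a.1) && decide (a.2 < b.2)) = decide (toLex a < toLex b) := by
  rcases lt_trichotomy a.1 b.1 with h | h | h
  · simp [Prod.Lex.toLex_lt_toLex, h, lt_asymm h]
  · simp [Prod.Lex.toLex_lt_toLex, h]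
  · simp [Prod.Lex.toLex_lt_toLex, h, lt_asymm h, ne_of_gt h]

-- A's sorted2 with keys fst, snd is sorted with the lexicographic key
lemma sorted2_eq_sorted_lex (xs : List (Char × Int)) :
    PySem.List.sorted2 xs (fun x => x.1) (fun x => x.2)
      = PySem.List.sorted xs (fun x => toLex x) := by
  simp only [PySem.List.sorted2, PySem.List.sorted]
  congr 1
  funext acc x
  congr 1
  funext a b
  exact lex_bool a b

-- B's boolean tuple comparison is the same lexicographic order
lemma pairLtB_eq_decide (a b : Char × Int) : pairLtB a b = decide (toLex a < toLex b) := by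
  rcases lt_trichotomy a.1 b.1 with h | h | h
  · simp [pairLtB, Prod.Lex.toLex_lt_toLex, h, ne_of_lt h]
  · simp [pairLtB, Prod.Lex.toLex_lt_toLex, h]
  · simp [pairLtB, Prod.Lex.toLex_lt_toLex, lt_asymm h, ne_of_gt h]

-- in a strictly key-increasing permutation R of I, the element at index r has exactly r strict predecessors in I
lemma countP_rank {α κ : Type} [LinearOrder κ] (key : α → κ) (R I : List α)
    (hperm : R.Perm I) (hpw : R.Pairwise (fun a b => key a < key b))
    (r : Nat) (hr : r < R.length) :
    I.countP (fun y => decide (key y < key R[r])) = r := by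
  have hpg := List.pairwise_iff_getElem.1 hpw
  generalize hx : R[r] = x
  rw [← hperm.countP_eq]
  conv_lhs => rw [← List.take_append_drop r R]
  rw [List.countP_append]
  have h1 : (R.take r).countP (fun y => decide (key y < key x)) = r := by
    rw [List.countP_eq_length.2, List.length_take, min_eq_left (le_of_lt hr)]
    intro y hy
    obtain ⟨i, hi, rfl⟩ := List.getElem_of_mem hy
    have hilt : i < r := by have := hi; simp [List.length_take] at this; omega
    rw [List.getElem_take]
    exact decide_eq_true (hx ▸ hpg i r (by omega) hr hilt)
  have h2 : (R.drop r).countP (fun y => decide (key y < key x)) = 0 := by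
    rw [List.countP_eq_zero]
    intro y hy
    obtain ⟨i, hi, rfl⟩ := List.getElem_of_mem hy
    rw [List.getElem_drop]
    simp only [decide_eq_true_eq]
    rcases Nat.eq_zero_or_pos i with h0 | h0
    · subst h0
      have : R[r + 0] = x := by simpa using hx
      rw [this]; exact lt_irrefl _
    · have hlt := hpg r (r + i) hr (by simp at hi; omega) (by omega)
      rw [hx] at hlt
      exact fun h => absurd h (not_lt_of_gt hlt)
  rw [h1, h2]
  omega

-- the scatter loop: with in-range, pairwise-distinct positions it returns some O with O[pos of rank r] = k + r
lemma fold_set_spec (R : List (Char × Int)) : ∀ (k : Int) (acc : List Int),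
    (∀ p ∈ R, ∃ jn : Nat, p.2 = (jn : Int) ∧ jn < acc.length) →
    (R.map (fun p => p.2)).Nodup →
    ∃ O : List Int,
      (PySem.List.enumerate R k).foldl
          (fun a p => a.bind (fun o => PySem.List.pySet? o p.2.2 p.1)) (some acc) = some O
      ∧ O.length = acc.length
      ∧ (∀ j : Nat, ((j : Int) ∉ R.map (fun p => p.2)) → O[j]? = acc[j]?)
      ∧ (∀ (r : Nat) (hr : r < R.length), ∀ j : Nat, (R[r]'hr).2 = (j : Int) → O[j]? = some (k + r)) := by
  induction R with
  | nil =>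
    intro k acc _ _
    exact ⟨acc, by simp [PySem.List.enumerate_nil], rfl, fun _ _ => rfl, fun r hr => by simp at hr⟩
  | cons p rest ih =>
    intro k acc hmem hnd
    obtain ⟨j0, hj0eq, hj0lt⟩ := hmem p (List.mem_cons_self ..)
    rw [PySem.List.enumerate_cons]
    have hset : PySem.List.pySet? acc p.2 k = some (acc.set j0 k) := by
      rw [hj0eq]; exact PySem.List.pySet?_natCast acc j0 k hj0lt
    simp only [List.foldl_cons, Option.bind_some]
    rw [hset]
    simp only [List.map_cons, List.nodup_cons] at hnd
    obtain ⟨hj0notin, hndrest⟩ := hnd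
    obtain ⟨O, hfold, hlen, hunch, hhit⟩ := ih (k + 1) (acc.set j0 k)
      (fun q hq => by
        obtain ⟨jn, h1, h2⟩ := hmem q (List.mem_cons_of_mem _ hq)
        exact ⟨jn, h1, by simpa using h2⟩)
      hndrest
    refine ⟨O, hfold, by simpa using hlen, ?_, ?_⟩
    · intro j hj
      simp only [List.map_cons, List.mem_cons, not_or] at hj
      rw [hunch j hj.2]
      have hjne : j0 ≠ j := by
        intro h; exact hj.1 (by rw [← h, hj0eq])
      exact List.getElem?_set_ne hjne
    · intro r hr j hj
      cases r with
      | zero =>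
        have hjj : j = j0 := by
          have : (j : Int) = (j0 : Int) := by rw [← hj, ← hj0eq]; rfl
          exact_mod_cast this
        have hO : O[j0]? = (acc.set j0 k)[j0]? := by
          apply hunch
          rwa [hj0eq] at hj0notin
        rw [hjj, hO, List.getElem?_set_self (by simpa using hj0lt)]
        simp
      | succ r' =>
        have := hhit r' (by simpa using Nat.lt_of_succ_lt_succ hr) j (by simpa using hj)
        rw [this]
        congr 1
        push_cast
        ring

-- the common non-None branch: scatter-by-rank equals counting rank
lemma core_branch (L : List Char) :
    (PySem.List.enumerate (PySem.List.sorted2 ((PySem.List.enumerate L).map (fun p => (p.2, p.1))) (fun x => x.1) (fun x => x.2))).foldl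
        (fun acc p => acc.bind (fun o => PySem.List.pySet? o p.2.2 p.1)) (some (List.replicate L.length 0))
      = some ((PySem.List.pyRange 0 (L.length : Int)).map (fun i =>
          ((PySem.List.pyRange 0 (L.length : Int)).map (fun j =>
            if pairLtB (PySem.List.pyGetD L j ' ', j) (PySem.List.pyGetD L i ' ', i) then (1 : Int) else 0)).sum)) := by
  set n := L.length with hn
  set I : List (Char × Int) := (PySem.List.enumerate L).map (fun p => (p.2, p.1)) with hI
  have hIeq : I = (List.range n).map (fun (k : Nat) => (PySem.List.pyGetD L (k : Int) ' ', (k : Int))) := by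
    rw [hI, PySem.List.enumerate_eq_map_pyRange L ' ']
    have : PySem.List.len L = (n : Int) := by simp [PySem.List.len, hn]
    rw [this, PySem.List.pyRange_zero_natCast, List.map_map, List.map_map]
    rfl
  have hIlen : I.length = n := by rw [hIeq]; simp
  have hInodup : I.Nodup := by
    rw [hIeq]
    exact (List.nodup_range).map (fun a b h => by simpa using congrArg Prod.snd h)
  rw [sorted2_eq_sorted_lex]
  set R := PySem.List.sorted I (fun x => toLex x) with hR
  have hperm : R.Perm I := PySem.List.sorted_perm I _ false
  have hRlen : R.length = n := by rw [hperm.length_eq, hIlen]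
  have hRnodup : R.Nodup := (hperm.nodup_iff).mpr hInodup
  have hle : R.Pairwise (fun a b => toLex a ≤ toLex b) := PySem.List.sorted_pairwise I _
  have hpwlt : R.Pairwise (fun a b => toLex a < toLex b) := by
    refine (hle.and hRnodup).imp ?_
    rintro a b ⟨h1, h2⟩
    exact lt_of_le_of_ne h1 (fun he => h2 (by simpa using he))
  have hsndI : I.map (fun p => p.2) = (List.range n).map (fun (k : Nat) => (k : Int)) := by
    rw [hIeq, List.map_map]; rfl
  have hndsnd : (R.map (fun p => p.2)).Nodup := by
    refine ((hperm.map (fun p => p.2)).nodup_iff).mpr ?_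
    rw [hsndI]
    exact (List.nodup_range).map (fun a b h => by exact_mod_cast h)
  obtain ⟨O, hfold, hlen, _hunch, hhit⟩ := fold_set_spec R 0 (List.replicate n 0)
    (fun p hp => by
      have hpI : p ∈ I := hperm.mem_iff.mp hp
      rw [hIeq] at hpI
      obtain ⟨k, hk, rfl⟩ := List.mem_map.mp hpI
      exact ⟨k, rfl, by simpa using List.mem_range.mp hk⟩)
    hndsnd
  rw [hfold]
  congr 1
  have hlen' : O.length = n := by simpa using hlen
  have hpy : PySem.List.pyRange 0 (n : Int) = (List.range n).map (fun (k : Nat) => (k : Int)) :=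
    PySem.List.pyRange_zero_natCast n
  apply List.ext_getElem (by rw [hlen']; simp [hpy])
  intro i hi hi2
  have hin : i < n := by omega
  have hIi : I[i]'(hIlen ▸ hin) = (PySem.List.pyGetD L (i : Int) ' ', (i : Int)) := by
    rw [List.getElem_of_eq hIeq (hIlen ▸ hin)]
    simp
  obtain ⟨r, hrlt, hRr⟩ := List.getElem_of_mem (hperm.mem_iff.mpr (List.getElem_mem (hIlen ▸ hin)))
  have hOi : O[i]? = some ((0 : Int) + (r : Int)) := by
    apply hhit r hrlt i
    rw [hRr, hIi]
  have hOi' : O[i]'hi = (r : Int) := by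
    have h2 := List.getElem?_eq_getElem hi
    rw [hOi] at h2
    simp at h2
    omega
  rw [List.getElem_map]
  have hpyi : (PySem.List.pyRange 0 (n : Int))[i]'(by simpa using hi2) = (i : Int) := by
    rw [List.getElem_of_eq hpy (by simpa [hpy] using hi2)]
    simp
  rw [hpyi, hpy, List.map_map, hOi']
  show (r : Int) = (List.map (fun (k : Nat) =>
      if pairLtB (PySem.List.pyGetD L (k : Int) ' ', (k : Int)) (PySem.List.pyGetD L (i : Int) ' ', (i : Int)) then (1 : Int) else 0)
      (List.range n)).sum
  rw [PySem.List.sum_map_ite_one_zero]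
  have hcnt2 : List.countP (fun (k : Nat) => pairLtB (PySem.List.pyGetD L (k : Int) ' ', (k : Int)) (PySem.List.pyGetD L (i : Int) ' ', (i : Int))) (List.range n)
      = I.countP (fun y => pairLtB y (PySem.List.pyGetD L (i : Int) ' ', (i : Int))) := by
    rw [hIeq, List.countP_map]; rfl
  have hcnt3 : I.countP (fun y => pairLtB y (PySem.List.pyGetD L (i : Int) ' ', (i : Int))) = r := by
    have he : (fun y => pairLtB y (PySem.List.pyGetD L (i : Int) ' ', (i : Int)))
        = (fun y => decide (toLex y < toLex (R[r]'hrlt))) := by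
      funext y
      rw [pairLtB_eq_decide, hRr, hIi]
    rw [he]
    exact countP_rank (fun x => toLex x) R I hperm hpwlt r hrlt
  rw [hcnt2, hcnt3]

lemma slice_to_nonpos (xs : List Char) (b : Int) (h : (xs.length : Int) + b ≤ 0) :
    PySem.List.slice xs none (some b) = [] := by
  have h0 : PySem.List.clampIdx xs.length b = 0 := by
    simp only [PySem.List.clampIdx]; split_ifs <;> omega
  simp [PySem.List.slice, h0]

-- both ports branch identically; in the non-None branch [0]*w has length len(kw[:w])
lemma branch_eq (U : List Char) (w : Int) (hw : 0 ≤ w ∨ (U.length : Int) + w ≤ 0) :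
    (if ((PySem.List.slice U none (some w)).length : Int) < w then none
     else (PySem.List.enumerate (PySem.List.sorted2 (((PySem.List.enumerate (PySem.List.slice U none (some w)))).map (fun p => (p.2, p.1))) (fun x => x.1) (fun x => x.2))).foldl
        (fun acc p => acc.bind (fun o => PySem.List.pySet? o p.2.2 p.1)) (some (List.replicate w.toNat 0)))
    = (if ((PySem.List.slice U none (some w)).length : Int) < w then none
     else some ((PySem.List.pyRange 0 ((PySem.List.slice U none (some w)).length : Int)).map (fun i =>
      ((PySem.List.pyRange 0 ((PySem.List.slice U none (some w)).length : Int)).map (fun j =>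
        if pairLtB (PySem.List.pyGetD (PySem.List.slice U none (some w)) j ' ', j) (PySem.List.pyGetD (PySem.List.slice U none (some w)) i ' ', i) then (1 : Int) else 0)).sum))) := by
  set L := PySem.List.slice U none (some w) with hL
  by_cases hg : (L.length : Int) < w
  · rw [if_pos hg, if_pos hg]
  · rw [if_neg hg, if_neg hg]
    have hrep : w.toNat = L.length := by
      rcases hw with hw0 | hw1
      · have hlen : L.length = min w.toNat U.length := by
          rw [hL, PySem.List.slice_to U hw0]; simp
        omega
      · have : L = [] := by rw [hL]; exact slice_to_nonpos U w hw1
        rw [this]; simp; omega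
    rw [hrep]
    exact core_branch L

lemma main_eq (kw : String) (width : Option Int) (hpre : Pre_keyword_to_col_order kw width) :
    keyword_to_col_order kw width = keyword_to_col_order_alt kw width := by
  unfold Pre_keyword_to_col_order at hpre
  have hUlen : (PySem.Chars.upper kw.toList).length = kw.toList.length := by
    simp [PySem.Chars.upper]
  simp only [keyword_to_col_order, keyword_to_col_order_alt]
  apply branch_eq
  rcases width with _ | v
  · left; dsimp only; positivity
  · dsimp only
    by_cases hv : v = 0
    · rw [if_pos hv]; left; positivity
    · rw [if_neg hv]
      rw [hUlen]
      simpa using hpre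

-- ===== VERDICT (by name: the statement is the Claim_ definition above) =====
theorem keyword_to_col_order_spec : Claim_equal_keyword_to_col_order := by
  intro kw width _ hpre
  exact main_eq kw width hpre
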